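-- pv_equiv track=rewrite | github.com/nfaleide/OpenFMIS | src/openfmis/services/import_.py | _resolve_name_field
-- ===== SOURCE A (Python) =====
-- _NAME_CANDIDATES = (
--     "name",
--     "field_name",
--     "fieldname",
--     "field",
--     "label",
--     "parcel",
--     "tract",
--     "description",
--     "farm_name",
--     "farmname",
--     "objectid",
--     "fid",
-- )
--
-- def _resolve_name_field(schema_props: list[str], hint: str | None) -> str | None:
--     """Pick the best name attribute from the feature schema."""
--     props_lower = {p.lower(): p for p in schema_props}
--     if hint and hint.lower() in props_lower:
--         return props_lower[hint.lower()]
--     for cand in _NAME_CANDIDATES: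
--         if cand in props_lower:
--             return props_lower[cand]
--     return None
-- ===== SOURCE B (Python) =====
-- _NAME_CANDIDATES = (
--     "name",
--     "field_name",
--     "fieldname",
--     "field",
--     "label",
--     "parcel",
--     "tract",
--     "description",
--     "farm_name",
--     "farmname",
--     "objectid",
--     "fid",
-- )
--
-- def _resolve_name_field(schema_props, hint):
--     """Pick the best name attribute: one argmin pass over the schema by priority rank."""
--     rank = {c: i for i, c in enumerate(_NAME_CANDIDATES, start=1)}
--     if hint:
--         rank[hint.lower()] = 0
--     best = None
--     best_rank = None
--     for p in schema_props:
--         r = rank.get(p.lower())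
--         if r is not None and (best_rank is None or r < best_rank):
--             best, best_rank = p, r
--     return best
-- ===== Notes on version B (the rewrite author's own statement) =====
-- stated objective: alternative
-- what changed: B replaces A's lowercase->prop dict plus priority probing (hint, then each candidate) by the inverse traversal: a numeric priority rank per target name and a single argmin pass over schema_props keeping the lowest-ranked prop; Pre_ excludes schema lists containing two different spellings of the same relevant name, where A's dict last-wins pick is accidental (B keeps the first spelling).
-- outside the precondition, e.g. on _resolve_name_field(['Name', 'NAME'], None): A returns 'NAME', B returns 'Name'
import Mathlib
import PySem

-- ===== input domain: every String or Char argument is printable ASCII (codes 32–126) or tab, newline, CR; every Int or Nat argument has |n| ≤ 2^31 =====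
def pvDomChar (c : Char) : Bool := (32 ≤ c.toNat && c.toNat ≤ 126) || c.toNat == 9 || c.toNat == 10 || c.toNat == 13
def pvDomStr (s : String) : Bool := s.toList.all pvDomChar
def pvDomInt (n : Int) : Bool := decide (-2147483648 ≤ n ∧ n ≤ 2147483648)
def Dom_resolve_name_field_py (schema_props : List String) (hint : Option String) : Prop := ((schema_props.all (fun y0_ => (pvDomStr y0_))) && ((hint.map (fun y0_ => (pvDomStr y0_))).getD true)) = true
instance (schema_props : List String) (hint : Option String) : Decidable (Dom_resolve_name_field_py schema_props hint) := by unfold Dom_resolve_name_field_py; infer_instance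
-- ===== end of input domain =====

-- B replaces A's lowercase->prop dict plus priority probing by a numeric priority rank per
-- target name and a single argmin pass over schema_props; objective: alternative.
-- Pre_ excludes schema lists containing two different spellings of the same relevant name
-- (hint or candidate), where A's dict last-wins pick is accidental; B keeps the first occurrence.


-- the module constant _NAME_CANDIDATES (shared by both ports)
def nameCandidates : List String :=
  ["name", "field_name", "fieldname", "field", "label", "parcel", "tract",
   "description", "farm_name", "farmname", "objectid", "fid"]

-- ===== PORT A =====
-- the 'for cand in _NAME_CANDIDATES' loop of A
def loopA (d : PySem.Dict String String) : List String → Option String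
  | [] => none
  | c :: cs => if d.contains c then d.get? c else loopA d cs

def resolve_name_field_py (schema_props : List String) (hint : Option String) : Option String :=
  let props_lower := schema_props.foldl (fun d p => d.insert (PySem.Str.lower p) p) PySem.Dict.empty
  match hint with
  | some h =>
    if h ≠ "" ∧ props_lower.contains (PySem.Str.lower h) then
      props_lower.get? (PySem.Str.lower h)
    else loopA props_lower nameCandidates
  | none => loopA props_lower nameCandidates

-- ===== PORT B =====
def resolve_name_field_py_alt (schema_props : List String) (hint : Option String) : Option String :=
  -- rank = {c: i for i, c in enumerate(_NAME_CANDIDATES, start=1)}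
  let rank0 := (PySem.List.enumerate nameCandidates 1).foldl
    (fun d ic => d.insert ic.2 ic.1) PySem.Dict.empty
  -- if hint: rank[hint.lower()] = 0
  let rank := match hint with
    | some h => if h ≠ "" then rank0.insert (PySem.Str.lower h) 0 else rank0
    | none => rank0
  -- single pass: keep the prop with the lowest rank (first one on equal rank)
  let res := schema_props.foldl
    (fun s p =>
      match rank.get? (PySem.Str.lower p) with
      | none => s
      | some r =>
        match s.2 with
        | none => (some p, some r)
        | some br => if r < br then (some p, some r) else s)
    ((none, none) : Option String × Option Int)
  res.1

-- ===== PRECONDITION & SPEC =====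
-- the names a prop can match: the (truthy) hint's lowercase, then the candidates
def relevantNames (hint : Option String) : List String :=
  (match hint with
   | some h => if h ≠ "" then [PySem.Str.lower h] else []
   | none => []) ++ nameCandidates

-- Pre_ excludes schema lists containing two DIFFERENT spellings matching the same relevant
-- name (hint or candidate): there A's dict keeps the last spelling only by dict-reinsertion
-- accident (B keeps the first); all other inputs are admitted.
def Pre_resolve_name_field_py (schema_props : List String) (hint : Option String) : Prop :=
  ∀ t ∈ relevantNames hint,
    (schema_props.filter (fun p => PySem.Str.lower p == t)).Pairwise (· = ·)
instance (schema_props : List String) (hint : Option String) : Decidable (Pre_resolve_name_field_py schema_props hint) := by unfold Pre_resolve_name_field_py; infer_instance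

def pvWitness_resolve_name_field_py : List String × Option String := (["gid", "Label", "fid"], some "tract")

def Spec_resolve_name_field_py (schema_props : List String) (hint : Option String) (out : Option String) : Prop := out = resolve_name_field_py_alt schema_props hint
instance (schema_props : List String) (hint : Option String) (out : Option String) : Decidable (Spec_resolve_name_field_py schema_props hint out) := by unfold Spec_resolve_name_field_py; infer_instance

-- ===== CLAIM =====
def Claim_equal_resolve_name_field_py : Prop := ∀ (schema_props : List String) (hint : Option String), Dom_resolve_name_field_py schema_props hint → Pre_resolve_name_field_py schema_props hint → Spec_resolve_name_field_py schema_props hint (resolve_name_field_py schema_props hint)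

-- ===== LEMMAS AND PROOFS =====

-- last element of xs whose lowercase equals t (what A's dict stores at key t)
def lastLower (xs : List String) (t : String) : Option String :=
  xs.foldl (fun best p => if PySem.Str.lower p == t then some p else best) none

-- scan names in priority order, take the LAST case-insensitive match (A's shape)
def lastScan (xs : List String) : List String → Option String
  | [] => none
  | k :: ks => match lastLower xs k with
    | some v => some v
    | none => lastScan xs ks

-- scan names in priority order, take the FIRST case-insensitive match (common spec)
def firstScan (xs : List String) : List String → Option String
  | [] => none
  | k :: ks => match xs.find? (fun p => PySem.Str.lower p == k) with
    | some v => some v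
    | none => firstScan xs ks

-- rank of q in the name list ks whose first element has rank i (B's rank dict as a function)
def rankOfInt : List String → Int → String → Option Int
  | [], _, _ => none
  | k :: ks, i, q => if q = k then some i else rankOfInt ks (i + 1) q

-- the body of B's argmin fold, abstracted over the rank function
def bstep (f : String → Option Int) (s : Option String × Option Int) (p : String) :
    Option String × Option Int :=
  match f (PySem.Str.lower p) with
  | none => s
  | some r =>
    match s.2 with
    | none => (some p, some r)
    | some br => if r < br then (some p, some r) else s

theorem candidates_lower : ∀ c ∈ nameCandidates, PySem.Str.lower c = c := by decide

theorem candidates_nodup : nameCandidates.Nodup := by decide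

-- ---- A side ----
theorem get?_foldl_lowerInsert (xs : List String) (d : PySem.Dict String String) (t : String) :
    (xs.foldl (fun d p => d.insert (PySem.Str.lower p) p) d).get? t
      = xs.foldl (fun best p => if PySem.Str.lower p == t then some p else best) (d.get? t) := by
  induction xs generalizing d with
  | nil => rfl
  | cons p xs ih =>
    simp only [List.foldl_cons]
    rw [ih]
    congr 1
    rw [PySem.Dict.get?_insert]
    by_cases h : PySem.Str.lower p = t
    · simp [h]
    · simp [h, Ne.symm h]

theorem get?_eq_lastLower (schema_props : List String) (t : String) :
    (schema_props.foldl (fun d p => d.insert (PySem.Str.lower p) p) PySem.Dict.empty).get? t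
      = lastLower schema_props t := by
  rw [get?_foldl_lowerInsert]
  rfl

theorem loopA_eq_lastScan (schema_props : List String) (cs : List String)
    (hlc : ∀ c ∈ cs, PySem.Str.lower c = c) :
    loopA (schema_props.foldl (fun d p => d.insert (PySem.Str.lower p) p) PySem.Dict.empty) cs
      = lastScan schema_props cs := by
  induction cs with
  | nil => rfl
  | cons c cs ih =>
    have hc : PySem.Str.lower c = c := hlc c (List.mem_cons_self ..)
    have hrest : ∀ c' ∈ cs, PySem.Str.lower c' = c' := fun c' h => hlc c' (List.mem_cons_of_mem _ h)
    simp only [loopA, lastScan, PySem.Dict.contains_eq_isSome_get?, get?_eq_lastLower]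
    cases lastLower schema_props c with
    | none => simpa using ih hrest
    | some v => simp

theorem A_eq_lastScan (schema_props : List String) (hint : Option String) :
    resolve_name_field_py schema_props hint = lastScan schema_props (relevantNames hint) := by
  unfold resolve_name_field_py relevantNames
  cases hint with
  | none => simpa using loopA_eq_lastScan schema_props nameCandidates candidates_lower
  | some h =>
    by_cases hne : h = ""
    · subst hne
      simpa using loopA_eq_lastScan schema_props nameCandidates candidates_lower
    · simp only [hne, ne_eq, not_false_iff, true_and, List.cons_append, List.nil_append,
        reduceIte, lastScan, PySem.Dict.contains_eq_isSome_get?, get?_eq_lastLower]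
      cases hcase : lastLower schema_props (PySem.Str.lower h) with
      | some v => simp
      | none => simpa [hcase] using loopA_eq_lastScan schema_props nameCandidates candidates_lower

-- lastLower is find? on the reversed list
theorem lastLower_eq_find?_reverse (xs : List String) (t : String) :
    lastLower xs t = xs.reverse.find? (fun p => PySem.Str.lower p == t) := by
  have aux : ∀ (ys : List String) (s : Option String),
      ys.foldl (fun best p => if PySem.Str.lower p == t then some p else best) s
        = (ys.reverse.find? (fun p => PySem.Str.lower p == t)).or s := by
    intro ys
    induction ys with
    | nil => intro s; rfl
    | cons x ys ih =>
      intro s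
      simp only [List.foldl_cons, List.reverse_cons, List.find?_append, Option.or_assoc, ih]
      congr 1
      by_cases hx : PySem.Str.lower x == t <;> simp [List.find?, hx]
  simpa [lastLower] using aux xs none

theorem head?_eq_getLast?_of_pairwise_eq (l : List String) (h : l.Pairwise (· = ·)) :
    l.head? = l.getLast? := by
  induction l with
  | nil => rfl
  | cons a l ih =>
    cases l with
    | nil => rfl
    | cons b l' =>
      have hab : a = b := (List.pairwise_cons.mp h).1 b (List.mem_cons_self ..)
      have htail := ih (List.Pairwise.of_cons h)
      rw [List.getLast?_cons_cons, ← htail]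
      simp [hab]

theorem find?_eq_head?_filter' (p : String → Bool) (l : List String) :
    l.find? p = (l.filter p).head? := by
  induction l with
  | nil => rfl
  | cons x l ih =>
    cases hx : p x
    · rw [List.find?_cons_of_neg (by simp [hx]), List.filter_cons, ih]
      simp [hx]
    · rw [List.find?_cons_of_pos hx, List.filter_cons]
      simp [hx]

theorem lastLower_eq_find? (xs : List String) (t : String)
    (h : (xs.filter (fun p => PySem.Str.lower p == t)).Pairwise (· = ·)) :
    lastLower xs t = xs.find? (fun p => PySem.Str.lower p == t) := by
  rw [lastLower_eq_find?_reverse, find?_eq_head?_filter', find?_eq_head?_filter',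
    List.filter_reverse, List.head?_reverse, head?_eq_getLast?_of_pairwise_eq _ h]

theorem lastScan_eq_firstScan (xs : List String) (ks : List String)
    (h : ∀ t ∈ ks, (xs.filter (fun p => PySem.Str.lower p == t)).Pairwise (· = ·)) :
    lastScan xs ks = firstScan xs ks := by
  induction ks with
  | nil => rfl
  | cons k ks ih =>
    simp only [lastScan, firstScan, lastLower_eq_find? xs k (h k (List.mem_cons_self ..))]
    cases xs.find? (fun p => PySem.Str.lower p == k) with
    | some v => rfl
    | none => exact ih (fun t ht => h t (List.mem_cons_of_mem _ ht))

-- ---- B side ----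
theorem rankOfInt_ge (ks : List String) (i : Int) (q : String) (r : Int)
    (h : rankOfInt ks i q = some r) : i ≤ r := by
  induction ks generalizing i with
  | nil => simp [rankOfInt] at h
  | cons k ks ih =>
    by_cases hq : q = k
    · simp [rankOfInt, hq] at h; omega
    · simp only [rankOfInt, if_neg hq] at h
      have := ih (i + 1) h
      omega

theorem rankOfInt_none_of_not_mem (ks : List String) (i : Int) (q : String)
    (h : q ∉ ks) : rankOfInt ks i q = none := by
  induction ks generalizing i with
  | nil => rfl
  | cons k ks ih =>
    have hq : q ≠ k := fun hk => h (hk ▸ List.mem_cons_self ..)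
    simp only [rankOfInt, if_neg hq]
    exact ih (i + 1) (fun hm => h (List.mem_cons_of_mem _ hm))

theorem rankOfInt_eq_self_iff (ks : List String) (i : Int) (q k : String) :
    rankOfInt (k :: ks) i q = some i ↔ q = k := by
  by_cases hq : q = k
  · simp [rankOfInt, hq]
  · constructor
    · intro hcon
      simp only [rankOfInt, if_neg hq] at hcon
      have := rankOfInt_ge ks (i + 1) q i hcon
      omega
    · intro h
      exact absurd h hq

-- a state that already holds the minimum possible rank never changes
theorem foldl_bstep_fixed (f : String → Option Int) (i : Int)
    (hge : ∀ q r, f q = some r → i ≤ r) (xs : List String) (s : Option String × Option Int)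
    (hs : s.2 = some i) : xs.foldl (bstep f) s = s := by
  induction xs with
  | nil => rfl
  | cons x xs ih =>
    have hstep : bstep f s x = s := by
      unfold bstep
      cases hfx : f (PySem.Str.lower x) with
      | none => rfl
      | some r =>
        have hir := hge _ _ hfx
        simp [hs, if_neg (by omega : ¬ r < i)]
    rw [List.foldl_cons, hstep, ih]

-- the first element achieving the minimum possible rank wins the argmin fold
theorem foldl_bstep_min (f : String → Option Int) (i : Int)
    (hge : ∀ q r, f q = some r → i ≤ r) (xs : List String)
    (s : Option String × Option Int)
    (hs : s.2 = none ∨ ∃ br, s.2 = some br ∧ i < br) (p₀ : String)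
    (hfind : xs.find? (fun p => f (PySem.Str.lower p) == some i) = some p₀) :
    (xs.foldl (bstep f) s).1 = some p₀ := by
  induction xs generalizing s with
  | nil => simp at hfind
  | cons x xs ih =>
    by_cases hfx : f (PySem.Str.lower x) = some i
    · rw [List.find?_cons_of_pos (by simp [hfx])] at hfind
      obtain rfl : x = p₀ := by simpa using hfind
      have hstep : bstep f s x = (some x, some i) := by
        rcases hs with h2 | ⟨br, h2, hlt⟩
        · simp [bstep, hfx, h2]
        · simp [bstep, hfx, h2, hlt]
      rw [List.foldl_cons, hstep, foldl_bstep_fixed f i hge xs _ rfl]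
    · rw [List.find?_cons_of_neg (by simp [hfx])] at hfind
      rw [List.foldl_cons]
      apply ih _ _ hfind
      cases hfv : f (PySem.Str.lower x) with
      | none => simpa [bstep, hfv] using hs
      | some r =>
        have hir : i ≤ r := hge _ _ hfv
        have hne : r ≠ i := fun hri => hfx (hri ▸ hfv)
        rcases hs with h2 | ⟨br, h2, hlt⟩
        · right; exact ⟨r, by simp [bstep, hfv, h2], by omega⟩
        · by_cases hrb : r < br
          · right; exact ⟨r, by simp [bstep, hfv, h2, hrb], by omega⟩
          · right; exact ⟨br, by simp [bstep, hfv, h2, hrb], hlt⟩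

theorem find?_congr' (p q : String → Bool) (l : List String) (h : ∀ x, p x = q x) :
    l.find? p = l.find? q := by
  induction l with
  | nil => rfl
  | cons x l ih =>
    cases hx : q x
    · rw [List.find?_cons_of_neg (by simp [h x, hx]), List.find?_cons_of_neg (by simp [hx]), ih]
    · rw [List.find?_cons_of_pos (by simp [h x, hx]), List.find?_cons_of_pos hx]

theorem foldl_bstep_none (f : String → Option Int) (hf : ∀ q, f q = none)
    (xs : List String) (s : Option String × Option Int) : xs.foldl (bstep f) s = s := by
  induction xs generalizing s with
  | nil => rfl
  | cons x xs ih => rw [List.foldl_cons]; simpa [bstep, hf] using ih _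

theorem foldl_bstep_eq_firstScan (ks : List String) (i : Int) (xs : List String) :
    (xs.foldl (bstep (rankOfInt ks i)) (none, none)).1 = firstScan xs ks := by
  induction ks generalizing i with
  | nil =>
    rw [foldl_bstep_none (rankOfInt [] i) (fun q => rfl) xs ((none, none))]
    rfl
  | cons k ks ih =>
    have hpred : ∀ p : String,
        (rankOfInt (k :: ks) i (PySem.Str.lower p) == some i) = (PySem.Str.lower p == k) := by
      intro p
      by_cases hp : PySem.Str.lower p = k
      · simp [hp, rankOfInt]
      · have h2 : rankOfInt (k :: ks) i (PySem.Str.lower p) ≠ some i :=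
          fun hcon => hp ((rankOfInt_eq_self_iff ks i _ k).mp hcon)
        simp [hp, h2]
    cases hfind : xs.find? (fun p => PySem.Str.lower p == k) with
    | some p₀ =>
      have : xs.find? (fun p => rankOfInt (k :: ks) i (PySem.Str.lower p) == some i) = some p₀ := by
        rw [find?_congr' _ _ xs hpred]; exact hfind
      rw [foldl_bstep_min (rankOfInt (k :: ks) i) i
        (fun q r h => rankOfInt_ge (k :: ks) i q r h) xs _ (Or.inl rfl) p₀ this]
      simp [firstScan, hfind]
    | none =>
      have hnk : ∀ p ∈ xs, PySem.Str.lower p ≠ k := by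
        intro p hp
        have := List.find?_eq_none.mp hfind p hp
        simpa using this
      have hcongr := PySem.List.foldl_congr_mem
        (l := xs) (init := ((none, none) : Option String × Option Int))
        (f := bstep (rankOfInt (k :: ks) i)) (g := bstep (rankOfInt ks (i + 1)))
        (fun acc x hx => by simp [bstep, rankOfInt, hnk x hx])
      rw [hcongr, ih (i + 1)]
      simp [firstScan, hfind]

theorem get?_rankFold (ks : List String) (hnd : ks.Nodup) (i : Int)
    (d : PySem.Dict String Int) (q : String) :
    ((PySem.List.enumerate ks i).foldl (fun d ic => d.insert ic.2 ic.1) d).get? q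
      = match rankOfInt ks i q with
        | some r => some r
        | none => d.get? q := by
  induction ks generalizing i d with
  | nil => rfl
  | cons k ks ih =>
    rw [PySem.List.enumerate_cons, List.foldl_cons,
      ih (List.nodup_cons.mp hnd).2 (i + 1) (d.insert k i)]
    by_cases hq : q = k
    · subst hq
      rw [rankOfInt_none_of_not_mem ks (i + 1) q (List.nodup_cons.mp hnd).1]
      simp [rankOfInt, PySem.Dict.get?_insert_self]
    · simp only [rankOfInt, if_neg hq]
      cases rankOfInt ks (i + 1) q with
      | some r => rfl
      | none => simp [PySem.Dict.get?_insert_of_ne _ _ hq]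

theorem rank0_get? (q : String) :
    ((PySem.List.enumerate nameCandidates 1).foldl
        (fun d ic => d.insert ic.2 ic.1) PySem.Dict.empty).get? q
      = rankOfInt nameCandidates 1 q := by
  rw [get?_rankFold nameCandidates candidates_nodup 1 PySem.Dict.empty q]
  cases rankOfInt nameCandidates 1 q <;> simp [PySem.Dict.get?_empty]

theorem B_eq_firstScan (schema_props : List String) (hint : Option String) :
    resolve_name_field_py_alt schema_props hint = firstScan schema_props (relevantNames hint) := by
  unfold resolve_name_field_py_alt relevantNames
  have main : ∀ (rk : PySem.Dict String Int) (ks : List String) (i : Int),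
      (∀ q, rk.get? q = rankOfInt ks i q) →
      (schema_props.foldl
        (fun s p =>
          match rk.get? (PySem.Str.lower p) with
          | none => s
          | some r =>
            match s.2 with
            | none => (some p, some r)
            | some br => if r < br then (some p, some r) else s)
        ((none, none) : Option String × Option Int)).1 = firstScan schema_props ks := by
    intro rk ks i hrk
    have hcongr := PySem.List.foldl_congr_mem
      (l := schema_props) (init := ((none, none) : Option String × Option Int))
      (f := fun (s : Option String × Option Int) p =>
        match rk.get? (PySem.Str.lower p) with
        | none => s
        | some r =>
          match s.2 with
          | none => (some p, some r)
          | some br => if r < br then (some p, some r) else s)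
      (g := bstep (rankOfInt ks i))
      (fun acc x _ => by simp [bstep, hrk])
    rw [hcongr]
    exact foldl_bstep_eq_firstScan ks i schema_props
  cases hint with
  | none => simpa using main _ nameCandidates 1 rank0_get?
  | some h =>
    by_cases hne : h = ""
    · subst hne
      simpa using main _ nameCandidates 1 rank0_get?
    · simp only [hne, ne_eq, not_false_iff, reduceIte, List.cons_append, List.nil_append]
      apply main _ (PySem.Str.lower h :: nameCandidates) 0
      intro q
      rw [PySem.Dict.get?_insert, rank0_get?]
      by_cases hq : q = PySem.Str.lower h <;> simp [rankOfInt, hq]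

-- ===== VERDICT =====
theorem resolve_name_field_py_spec : Claim_equal_resolve_name_field_py := by
  intro schema_props hint _ hpre
  unfold Spec_resolve_name_field_py
  rw [A_eq_lastScan, B_eq_firstScan]
  exact lastScan_eq_firstScan schema_props (relevantNames hint) hpre
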